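-- pv_equiv track=rewrite | github.com/cmpnn-romain/Pi-bruteforce | src/search.py | _search_chunk
-- ===== SOURCE A (Python) =====
-- def _search_chunk(args):
--     """
--     Worker function for bruteforce search chunk.
--
--     Args:
--         args: Tuple of (start_idx, end_idx, pi_digits, length, starts_with, ends_with, contains)
--
--     Returns:
--         List of (position, number) tuples found in this chunk
--     """
--     start_idx, end_idx, pi_digits, length, starts_with, ends_with, contains = args
--     local_matches = []
--     local_seen = set()
--
--     for i in range(start_idx, min(end_idx, len(pi_digits) - length + 1)):
--         candidate = pi_digits[i:i + length]
--
--         # Check if candidate matches all criteria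
--         if len(candidate) != length:
--             continue
--
--         if starts_with and not candidate.startswith(starts_with):
--             continue
--
--         if ends_with and not candidate.endswith(ends_with):
--             continue
--
--         if contains and contains not in candidate:
--             continue
--
--         # Only add unique numbers
--         if candidate not in local_seen:
--             local_matches.append((i, candidate))
--             local_seen.add(candidate)
--
--     return local_matches
-- ===== SOURCE B (Python) =====
-- def _search_chunk(args):
--     """Staged filter pipeline: the window indices are narrowed by successive
--     passes (prefix pass, suffix pass, then a contains pass that precomputes all
--     occurrence positions once and sweeps them with a second pointer), and the
--     unique-candidate rule is applied last with a first-seen dict."""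
--     start_idx, end_idx, pi_digits, length, starts_with, ends_with, contains = args
--     n = len(pi_digits)
--     if length < 0:
--         return []
--     # stage 0: every window start in the chunk
--     idxs = list(range(start_idx, min(end_idx, n - length + 1)))
--     # stage 1: prefix test in place (window is fully in range here)
--     if starts_with:
--         idxs = [i for i in idxs if pi_digits.startswith(starts_with, i, i + length)]
--     # stage 2: suffix test at its fixed offset from the window start
--     if ends_with:
--         t = length - len(ends_with)
--         idxs = [i for i in idxs if t >= 0 and pi_digits.startswith(ends_with, i + t, i + length)]
--     # stage 3: contains: precompute all occurrence starts once, then merge the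
--     # two sorted lists with a second pointer (earliest occurrence >= i)
--     if contains:
--         occ = [p for p in range(n) if pi_digits.startswith(contains, p)]
--         limit = length - len(contains)
--         kept = []
--         j = 0
--         for i in idxs:
--             while j < len(occ) and occ[j] < i:
--                 j += 1
--             if j < len(occ) and occ[j] <= i + limit:
--                 kept.append(i)
--         idxs = kept
--     # stage 4: unique candidates, first window wins
--     first = {}
--     for i in idxs:
--         cand = pi_digits[i:i + length]
--         if cand not in first:
--             first[cand] = i
--     return [(i, cand) for cand, i in first.items()]
-- ===== Notes on version B (the rewrite author's own statement) =====
-- stated objective: alternative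
-- what changed: B replaces A's single sliding-window loop (slice each candidate, test startswith/endswith/in on the copy, set-based dedup inline) by a staged filter pipeline: a prefix pass and a suffix pass that test in place at fixed offsets, a contains pass that precomputes all occurrence positions once and merges them against the sorted window starts with a second pointer, and a final first-seen dict that applies the uniqueness rule.
-- outside the precondition, e.g. on _search_chunk((-6, 2, '31415', 2, '3', '', '')): A returns [(-5, '31')], B returns [(-6, '3'), (-5, '31')]
import Mathlib
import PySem

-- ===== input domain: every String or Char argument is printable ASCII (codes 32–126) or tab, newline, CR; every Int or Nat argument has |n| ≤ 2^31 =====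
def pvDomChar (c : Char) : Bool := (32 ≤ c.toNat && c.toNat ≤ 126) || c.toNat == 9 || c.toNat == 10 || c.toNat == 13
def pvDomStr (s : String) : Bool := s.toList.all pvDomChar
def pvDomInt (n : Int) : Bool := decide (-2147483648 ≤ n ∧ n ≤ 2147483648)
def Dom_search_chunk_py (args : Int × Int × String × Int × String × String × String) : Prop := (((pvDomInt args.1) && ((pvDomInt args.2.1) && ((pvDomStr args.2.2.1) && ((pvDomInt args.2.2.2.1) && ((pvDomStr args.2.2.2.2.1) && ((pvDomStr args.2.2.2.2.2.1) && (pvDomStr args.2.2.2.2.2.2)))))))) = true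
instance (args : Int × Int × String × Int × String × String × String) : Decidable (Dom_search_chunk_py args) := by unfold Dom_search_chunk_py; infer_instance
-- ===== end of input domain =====

-- B replaces A's single sliding-window loop (slice every candidate, test it, dedup inline
-- with a set) by a staged filter pipeline: a prefix pass and a suffix pass testing in place
-- at fixed offsets, a contains pass that precomputes all occurrence positions once and
-- merges them against the sorted window starts with a second pointer, and a final
-- first-seen dict applying the uniqueness rule (objective: alternative).

-- ===== PORT A =====
-- loop body of A (one iteration of the `for i in range(...)` loop)
def pvStepA (pi sw ew c : List Char) (length : Int)
    (st : List (Int × String) × PySem.Set String) (i : Int) :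
    List (Int × String) × PySem.Set String :=
  -- `cand` is Python's candidate = pi_digits[i:i+length]
  if (((PySem.List.slice pi (some i) (some (i + length))).length : Int) != length) then st
  else if (!sw.isEmpty && !PySem.Chars.startswith (PySem.List.slice pi (some i) (some (i + length))) sw) then st
  else if (!ew.isEmpty && !PySem.Chars.endswith (PySem.List.slice pi (some i) (some (i + length))) ew) then st
  else if (!c.isEmpty && !PySem.Chars.isIn c (PySem.List.slice pi (some i) (some (i + length)))) then st
  else if !(PySem.Set.contains st.2 (String.ofList (PySem.List.slice pi (some i) (some (i + length))))) then
    (st.1 ++ [(i, String.ofList (PySem.List.slice pi (some i) (some (i + length))))], PySem.Set.add st.2 (String.ofList (PySem.List.slice pi (some i) (some (i + length)))))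
  else st

def search_chunk_py (args : Int × Int × String × Int × String × String × String) : List (Int × String) :=
  let pi := args.2.2.1.toList
  let length := args.2.2.2.1
  ((PySem.List.pyRange args.1 (min args.2.1 ((pi.length : Int) - length + 1)) 1).foldl
    (pvStepA pi args.2.2.2.2.1.toList args.2.2.2.2.2.1.toList args.2.2.2.2.2.2.toList length)
    ([], PySem.Set.empty)).1

-- ===== PORT B =====
-- Python s.startswith(p, a, b), exact on all inputs: a and b are normalised by Python's
-- slice rule (negative values wrap by len(s), b is clamped to len(s)), then p must fit in
-- [st, e) and match at offset st.
def pvStartswithAt (s p : List Char) (a b : Int) : Bool :=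
  let n : Int := s.length
  let e : Int := if n < b then n else if b < 0 then (if b + n < 0 then 0 else b + n) else b
  let st : Int := if a < 0 then (if a + n < 0 then 0 else a + n) else a
  decide ((p.length : Int) + st ≤ e) && p.isPrefixOf (s.drop st.toNat)

-- B's inner `while j < len(occ) and occ[j] < i: j += 1`
def pvAdvance (occ : List Int) (j : Nat) (i : Int) : Nat :=
  if h : j < occ.length then
    if occ.getD j 0 < i then pvAdvance occ (j + 1) i else j
  else j
termination_by occ.length - j

-- B's two-pointer merge step (one iteration of `for i in idxs:` in stage 3)
def pvSweepStep (occ : List Int) (limit : Int) (st : List Int × Nat) (i : Int) :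
    List Int × Nat :=
  let j := pvAdvance occ st.2 i
  if decide (j < occ.length) && decide (occ.getD j 0 ≤ i + limit) then (st.1 ++ [i], j)
  else (st.1, j)

-- B's stage-4 step: `if cand not in first: first[cand] = i`
def pvDedupStep (pi : List Char) (length : Int) (d : PySem.Dict String Int) (i : Int) :
    PySem.Dict String Int :=
  let cand := String.ofList (PySem.List.slice pi (some i) (some (i + length)))
  if !(d.contains cand) then d.insert cand i else d

def search_chunk_py_alt (args : Int × Int × String × Int × String × String × String) : List (Int × String) :=
  let pi := args.2.2.1.toList
  let length := args.2.2.2.1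
  let sw := args.2.2.2.2.1.toList
  let ew := args.2.2.2.2.2.1.toList
  let c := args.2.2.2.2.2.2.toList
  let n : Int := pi.length
  if length < 0 then []
  else
    let idxs0 := PySem.List.pyRange args.1 (min args.2.1 (n - length + 1)) 1
    let idxs1 := if !sw.isEmpty then idxs0.filter (fun i => pvStartswithAt pi sw i (i + length)) else idxs0
    let tail := length - (ew.length : Int)
    let idxs2 := if !ew.isEmpty then idxs1.filter (fun i => decide (0 ≤ tail) && pvStartswithAt pi ew (i + tail) (i + length)) else idxs1
    let idxs3 := if !c.isEmpty then
        (idxs2.foldl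
          (pvSweepStep ((PySem.List.pyRange 0 n 1).filter (fun p => pvStartswithAt pi c p n))
            (length - (c.length : Int)))
          ([], 0)).1
      else idxs2
    ((idxs3.foldl (pvDedupStep pi length) PySem.Dict.empty).items).map (fun q => (q.2, q.1))

-- ===== PRECONDITION & SPEC =====
-- Pre_ restricts to the worker's natural domain 0 ≤ start_idx: for a negative loop index i
-- A's slice pi_digits[i:i+length] wraps around via Python's negative indexing and can return
-- accidental matches at negative positions, an artefact of slicing that B's offset-based
-- scan does not reproduce.
def Pre_search_chunk_py (args : Int × Int × String × Int × String × String × String) : Prop :=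
  0 ≤ args.1
instance (args : Int × Int × String × Int × String × String × String) : Decidable (Pre_search_chunk_py args) := by unfold Pre_search_chunk_py; infer_instance

def pvWitness_search_chunk_py : (Int × Int × String × Int × String × String × String) :=
  (0, 5, "314159", 2, "1", "", "")

def Spec_search_chunk_py (args : Int × Int × String × Int × String × String × String) (out : List (Int × String)) : Prop := out = search_chunk_py_alt args
instance (args : Int × Int × String × Int × String × String × String) (out : List (Int × String)) : Decidable (Spec_search_chunk_py args out) := by unfold Spec_search_chunk_py; infer_instance

-- ===== CLAIM (what is proved, stated in full; the proofs are below) =====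
def Claim_equal_search_chunk_py : Prop := ∀ (args : Int × Int × String × Int × String × String × String), Dom_search_chunk_py args → Pre_search_chunk_py args → Spec_search_chunk_py args (search_chunk_py args)

-- ===== LEMMAS AND PROOFS =====

-- A's dedup-only step (what pvStepA does once all three criteria passed)
def pvStepDedupA (pi : List Char) (L : Int)
    (st : List (Int × String) × PySem.Set String) (i : Int) :
    List (Int × String) × PySem.Set String :=
  let cand := String.ofList (PySem.List.slice pi (some i) (some (i + L)))
  if !(PySem.Set.contains st.2 cand) then (st.1 ++ [(i, cand)], PySem.Set.add st.2 cand) else st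

-- B's combined window predicate (empty pattern = stage skipped = always true)
def pvP (pi sw ew c : List Char) (L : Int) (i : Int) : Bool :=
  (sw.isEmpty || pvStartswithAt pi sw i (i + L))
  && ((ew.isEmpty || (decide (0 ≤ L - (ew.length : Int)) && pvStartswithAt pi ew (i + (L - (ew.length : Int))) (i + L)))
  && (c.isEmpty || ((PySem.List.pyRange 0 (pi.length : Int) 1).filter (fun p => pvStartswithAt pi c p (pi.length : Int))).any
        (fun p => decide (i ≤ p) && decide (p ≤ i + (L - (c.length : Int))))))

-- on an in-range window Python's bound normalisation in pvStartswithAt is the identity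
lemma pvStartswithAt_in_range (s p : List Char) (a b : Int) (ha : 0 ≤ a) (hb0 : 0 ≤ b)
    (hbn : b ≤ (s.length : Int)) :
    pvStartswithAt s p a b = (decide ((p.length : Int) + a ≤ b) && p.isPrefixOf (s.drop a.toNat)) := by
  unfold pvStartswithAt
  have h1 : ¬ ((s.length : Int) < b) := by omega
  have h2 : ¬ (b < 0) := by omega
  have h3 : ¬ (a < 0) := by omega
  simp only [if_neg h1, if_neg h2, if_neg h3]

-- A's startswith test on the candidate slice equals B's offset test (window in range).
lemma pv_sw_eq (pi sw : List Char) (i length : Int) (hi0 : 0 ≤ i) (hL : 0 ≤ length)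
    (hn : i + length ≤ (pi.length : Int)) :
    PySem.Chars.startswith (PySem.List.slice pi (some i) (some (i + length))) sw
      = pvStartswithAt pi sw i (i + length) := by
  rw [Bool.eq_iff_iff, PySem.Chars.startswith_iff,
    pvStartswithAt_in_range pi sw i (i + length) hi0 (by omega) hn,
    PySem.List.slice_toNat pi hi0 (by omega)]
  have hsub : (i + length).toNat - i.toNat = length.toNat := by omega
  rw [hsub, Bool.and_eq_true, decide_eq_true_eq, List.isPrefixOf_iff_prefix,
    List.prefix_take_iff]
  constructor
  · rintro ⟨h1, h2⟩; exact ⟨by omega, h1⟩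
  · rintro ⟨h1, h2⟩; exact ⟨h2, by omega⟩

-- A's endswith test on the candidate slice equals B's tail-offset test (window in range).
lemma pv_ew_eq (pi ew : List Char) (i length : Int) (hi0 : 0 ≤ i) (hL : 0 ≤ length)
    (hn : i + length ≤ (pi.length : Int)) :
    PySem.Chars.endswith (PySem.List.slice pi (some i) (some (i + length))) ew
      = (decide (0 ≤ length - (ew.length : Int))
          && pvStartswithAt pi ew (i + (length - (ew.length : Int))) (i + length)) := by
  rw [Bool.eq_iff_iff, PySem.Chars.endswith_iff, PySem.List.slice_toNat pi hi0 (by omega)]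
  have hsub : (i + length).toNat - i.toNat = length.toNat := by omega
  rw [hsub]
  by_cases htail : (ew.length : Int) ≤ length
  · rw [pvStartswithAt_in_range pi ew (i + (length - (ew.length : Int))) (i + length)
      (by omega) (by omega) hn]
    have hdecide : decide (0 ≤ length - (ew.length : Int)) = true := by
      simp; omega
    have hdecide2 : decide ((ew.length : Int) + (i + (length - (ew.length : Int))) ≤ i + length) = true := by
      simp; omega
    rw [hdecide, hdecide2, Bool.true_and, Bool.true_and, List.isPrefixOf_iff_prefix]
    have htn : (i + (length - (ew.length : Int))).toNat = i.toNat + (length.toNat - ew.length) := by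
      omega
    rw [htn, List.suffix_iff_eq_drop, ← List.drop_drop, List.drop_take]
    have hlen : (List.take length.toNat (List.drop i.toNat pi)).length = length.toNat := by
      simp; omega
    rw [hlen]
    have h1 : length.toNat - (length.toNat - ew.length) = ew.length := by omega
    rw [h1]
    exact (List.prefix_iff_eq_take).symm
  · have hdec : decide (0 ≤ length - (ew.length : Int)) = false := by simp; omega
    rw [hdec, Bool.false_and]
    simp only [Bool.false_eq_true, iff_false]
    intro h
    have := h.length_le
    simp at this
    omega

-- A's `contains in candidate` ↔ some precomputed occurrence starts inside the window
-- (nonempty pattern, window in range).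
lemma pv_c_occ (pi c : List Char) (i L : Int) (hc : c ≠ []) (hi0 : 0 ≤ i) (hL : 0 ≤ L)
    (hn : i + L ≤ (pi.length : Int)) :
    PySem.Chars.isIn c (PySem.List.slice pi (some i) (some (i + L)))
      = ((PySem.List.pyRange 0 (pi.length : Int) 1).filter (fun p => pvStartswithAt pi c p (pi.length : Int))).any
          (fun p => decide (i ≤ p) && decide (p ≤ i + (L - (c.length : Int)))) := by
  have hclen : 0 < c.length := List.length_pos_iff.mpr hc
  rw [Bool.eq_iff_iff, ← PySem.Chars.exists_prefix_drop_iff_isIn,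
    PySem.List.slice_toNat pi hi0 (by omega)]
  have hsub : (i + L).toNat - i.toNat = L.toNat := by omega
  rw [hsub]
  constructor
  · rintro ⟨j, hj⟩
    rw [List.drop_take, List.drop_drop, List.prefix_take_iff] at hj
    obtain ⟨hpre, hlen⟩ := hj
    refine List.any_eq_true.mpr ⟨i + j, ?_, ?_⟩
    · rw [List.mem_filter]
      constructor
      · rw [PySem.List.mem_pyRange_one]; omega
      · rw [pvStartswithAt_in_range pi c (i + j) (pi.length : Int) (by omega) (by omega) le_rfl]
        have htn : (i + (j : Int)).toNat = i.toNat + j := by omega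
        rw [htn, Bool.and_eq_true, decide_eq_true_eq, List.isPrefixOf_iff_prefix]
        exact ⟨by omega, hpre⟩
    · rw [Bool.and_eq_true, decide_eq_true_eq, decide_eq_true_eq]
      omega
  · intro h
    obtain ⟨p, hpmem, hpw⟩ := List.any_eq_true.mp h
    rw [List.mem_filter] at hpmem
    obtain ⟨hpr, hps⟩ := hpmem
    rw [PySem.List.mem_pyRange_one] at hpr
    rw [pvStartswithAt_in_range pi c p (pi.length : Int) (by omega) (by omega) le_rfl,
      Bool.and_eq_true, decide_eq_true_eq, List.isPrefixOf_iff_prefix] at hps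
    obtain ⟨hfit, hpre⟩ := hps
    rw [Bool.and_eq_true, decide_eq_true_eq, decide_eq_true_eq] at hpw
    refine ⟨(p - i).toNat, ?_⟩
    rw [List.drop_take, List.drop_drop, List.prefix_take_iff]
    have htn : i.toNat + (p - i).toNat = p.toNat := by omega
    rw [htn]
    exact ⟨hpre, by omega⟩

-- the while-loop pvAdvance: keeps "< i" to the left, stops at the first "≥ i", never backs up
lemma pvAdvance_spec (occ : List Int) (j : Nat) (i : Int)
    (h0 : ∀ k, k < j → occ.getD k 0 < i) :
    (∀ k, k < pvAdvance occ j i → occ.getD k 0 < i)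
      ∧ (pvAdvance occ j i < occ.length → ¬ occ.getD (pvAdvance occ j i) 0 < i)
      ∧ j ≤ pvAdvance occ j i := by
  induction j using pvAdvance.induct (occ := occ) (i := i) with
  | case1 j hj hlt ih =>
    have heq : pvAdvance occ j i = pvAdvance occ (j + 1) i := by
      conv_lhs => rw [pvAdvance]
      rw [dif_pos hj, if_pos hlt]
    rw [heq]
    have h0' : ∀ k, k < j + 1 → occ.getD k 0 < i := by
      intro k hk
      rcases Nat.lt_succ_iff_lt_or_eq.mp hk with h | h
      · exact h0 k h
      · subst h; exact hlt
    obtain ⟨a, b, cle⟩ := ih h0'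
    exact ⟨a, b, by omega⟩
  | case2 j hj hlt =>
    have heq : pvAdvance occ j i = j := by
      rw [pvAdvance, dif_pos hj, if_neg hlt]
    rw [heq]
    exact ⟨h0, fun _ => hlt, le_rfl⟩
  | case3 j hj =>
    have heq : pvAdvance occ j i = j := by
      rw [pvAdvance, dif_neg hj]
    rw [heq]
    exact ⟨h0, fun h => absurd h hj, le_rfl⟩

-- after advancing, the pointer test answers "is there an occurrence in [i, i+limit]?"
lemma pvTest_eq (occ : List Int) (hocc : occ.Pairwise (· < ·)) (i limit : Int) (j' : Nat)
    (hall : ∀ k, k < j' → occ.getD k 0 < i)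
    (hstop : j' < occ.length → ¬ occ.getD j' 0 < i) :
    (decide (j' < occ.length) && decide (occ.getD j' 0 ≤ i + limit))
      = occ.any (fun p => decide (i ≤ p) && decide (p ≤ i + limit)) := by
  rw [Bool.eq_iff_iff, Bool.and_eq_true, decide_eq_true_eq, decide_eq_true_eq,
    List.any_eq_true]
  constructor
  · rintro ⟨hjl, hle⟩
    refine ⟨occ.getD j' 0, ?_, ?_⟩
    · rw [List.getD_eq_getElem occ 0 hjl]; exact List.getElem_mem hjl
    · rw [Bool.and_eq_true, decide_eq_true_eq, decide_eq_true_eq]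
      exact ⟨not_lt.mp (hstop hjl), hle⟩
  · rintro ⟨p, hpmem, hp⟩
    rw [Bool.and_eq_true, decide_eq_true_eq, decide_eq_true_eq] at hp
    obtain ⟨hip, hplim⟩ := hp
    obtain ⟨m, hm, hpeq⟩ := List.mem_iff_getElem.mp hpmem
    have hjm : j' ≤ m := by
      by_contra hcon
      have := hall m (by omega)
      rw [List.getD_eq_getElem occ 0 hm] at this
      omega
    have hjl : j' < occ.length := lt_of_le_of_lt hjm hm
    refine ⟨hjl, ?_⟩
    rw [List.getD_eq_getElem occ 0 hjl]
    rcases eq_or_lt_of_le hjm with h | h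
    · subst h; rw [hpeq]; exact hplim
    · have := (List.pairwise_iff_getElem.mp hocc) j' m hjl hm h
      omega
-- the two-pointer sweep over ascending window starts IS the filter by "occurrence in window"
lemma pvSweep_eq (occ : List Int) (limit : Int) (hocc : occ.Pairwise (· < ·)) :
    ∀ (idxs : List Int), idxs.Pairwise (· ≤ ·) →
    ∀ (j : Nat) (acc : List Int),
      (∀ k, k < j → ∀ i ∈ idxs, occ.getD k 0 < i) →
      (idxs.foldl (pvSweepStep occ limit) (acc, j)).1
        = acc ++ idxs.filter (fun i => occ.any (fun p => decide (i ≤ p) && decide (p ≤ i + limit))) := by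
  intro idxs
  induction idxs with
  | nil => intro _ j acc _; simp
  | cons i tl ih =>
    intro hpw j acc hinv
    rw [List.pairwise_cons] at hpw
    obtain ⟨hhead, htl⟩ := hpw
    have hadv := pvAdvance_spec occ j i (fun k hk => hinv k hk i (List.mem_cons_self))
    obtain ⟨hall, hstop, _⟩ := hadv
    have htest := pvTest_eq occ hocc i limit (pvAdvance occ j i) hall hstop
    have hinv' : ∀ k, k < pvAdvance occ j i → ∀ x ∈ tl, occ.getD k 0 < x := by
      intro k hk x hx
      exact lt_of_lt_of_le (hall k hk) (hhead x hx)
    simp only [List.foldl_cons, pvSweepStep, List.filter_cons]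
    rw [← htest]
    cases hT : (decide (pvAdvance occ j i < occ.length) && decide (occ.getD (pvAdvance occ j i) 0 ≤ i + limit)) with
    | true =>
      simp only [reduceIte]
      rw [ih htl (pvAdvance occ j i) (acc ++ [i]) hinv']
      simp
    | false =>
      simp only [Bool.false_eq_true, if_false]
      rw [ih htl (pvAdvance occ j i) acc hinv']

-- A's (matches, seen)-pair loop and B's first-seen dict loop stay in lockstep
lemma pvDedup_eq (pi : List Char) (L : Int) :
    ∀ (idxs : List Int) (ms : List (Int × String)) (seen : PySem.Set String)
      (d : PySem.Dict String Int),
      d.items = ms.map (fun p => (p.2, p.1)) →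
      (∀ s, PySem.Set.contains seen s = d.contains s) →
      (idxs.foldl (pvStepDedupA pi L) (ms, seen)).1
        = ((idxs.foldl (pvDedupStep pi L) d).items).map (fun q => (q.2, q.1)) := by
  intro idxs
  induction idxs with
  | nil =>
    intro ms seen d h1 h2
    simp [h1, Function.comp_def]
  | cons i tl ih =>
    intro ms seen d h1 h2
    simp only [List.foldl_cons, pvStepDedupA, pvDedupStep]
    rw [h2]
    cases hc : d.contains (String.ofList (PySem.List.slice pi (some i) (some (i + L)))) with
    | true =>
      simp only [Bool.not_true, Bool.false_eq_true, if_false]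
      exact ih ms seen d h1 h2
    | false =>
      simp only [Bool.not_false, if_true]
      refine ih _ _ _ ?_ ?_
      · rw [PySem.Dict.items_insert_of_not_contains d i hc, h1, List.map_append]
        simp
      · intro s
        rw [PySem.Dict.contains_insert]
        unfold PySem.Set.add
        rw [h2, hc]
        simp only [Bool.false_eq_true, if_false]
        have h2'' : ∀ t : String, decide (t ∈ seen) = d.contains t := by
          intro t; rw [← h2 t]; simp [PySem.Set.contains]
        have hbe : (s == String.ofList (PySem.List.slice pi (some i) (some (i + L))))
            = decide (s = String.ofList (PySem.List.slice pi (some i) (some (i + L)))) := by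
          rw [Bool.eq_iff_iff]; simp
        simp [PySem.Set.contains, h2'', hbe, Bool.or_comm]

-- for an in-range window A's step is "dedup if all criteria pass" with B's predicate
lemma pvStepA_eq_if (pi sw ew c : List Char) (L i : Int)
    (hi0 : 0 ≤ i) (hiw : i < (pi.length : Int) - L + 1) (hL : 0 ≤ L)
    (st : List (Int × String) × PySem.Set String) :
    pvStepA pi sw ew c L st i
      = if pvP pi sw ew c L i then pvStepDedupA pi L st i else st := by
  have hn : i + L ≤ (pi.length : Int) := by omega
  unfold pvStepA pvP pvStepDedupA
  have hclen : ((PySem.List.slice pi (some i) (some (i + L))).length : Int) = L := by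
    rw [PySem.List.slice_toNat pi hi0 (by omega)]
    have hsub : (i + L).toNat - i.toNat = L.toNat := by omega
    rw [hsub]
    simp
    omega
  rw [hclen, bne_self_eq_false]
  have hsw : (!sw.isEmpty && !PySem.Chars.startswith (PySem.List.slice pi (some i) (some (i + L))) sw)
      = !(sw.isEmpty || pvStartswithAt pi sw i (i + L)) := by
    cases sw with
    | nil => simp
    | cons a l =>
      rw [pv_sw_eq pi (a :: l) i L hi0 hL hn]
      simp
  have hew : (!ew.isEmpty && !PySem.Chars.endswith (PySem.List.slice pi (some i) (some (i + L))) ew)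
      = !(ew.isEmpty || (decide (0 ≤ L - (ew.length : Int))
          && pvStartswithAt pi ew (i + (L - (ew.length : Int))) (i + L))) := by
    cases ew with
    | nil => simp
    | cons a l =>
      rw [pv_ew_eq pi (a :: l) i L hi0 hL hn]
      simp
  have hc : (!c.isEmpty && !PySem.Chars.isIn c (PySem.List.slice pi (some i) (some (i + L))))
      = !(c.isEmpty || ((PySem.List.pyRange 0 (pi.length : Int) 1).filter (fun p => pvStartswithAt pi c p (pi.length : Int))).any
            (fun p => decide (i ≤ p) && decide (p ≤ i + (L - (c.length : Int))))) := by
    cases c with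
    | nil => simp
    | cons a l =>
      rw [pv_c_occ pi (a :: l) i L (by simp) hi0 hL hn]
      simp
  rw [hsw, hew, hc]
  cases h1 : (sw.isEmpty || pvStartswithAt pi sw i (i + L)) <;>
    cases h2 : (ew.isEmpty || (decide (0 ≤ L - (ew.length : Int))
        && pvStartswithAt pi ew (i + (L - (ew.length : Int))) (i + L))) <;>
    cases h3 : (c.isEmpty || ((PySem.List.pyRange 0 (pi.length : Int) 1).filter (fun p => pvStartswithAt pi c p (pi.length : Int))).any
        (fun p => decide (i ≤ p) && decide (p ≤ i + (L - (c.length : Int))))) <;>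
    simp

-- predicate form of B's three optional stages (stage skipped = pattern empty = true)
lemma pvStage_if_eq (idxs0 : List Int) (t : Int → Bool) (w : List Char)
    (f : List Int → List Int) (hf : f idxs0 = idxs0.filter t) :
    (if !w.isEmpty then f idxs0 else idxs0) = idxs0.filter (fun i => w.isEmpty || t i) := by
  cases w with
  | nil => simp
  | cons a l => simpa using hf

-- ===== VERDICT (by name: the statement is the Claim_ definition above) =====
theorem search_chunk_py_spec : Claim_equal_search_chunk_py := by
  intro args hdom hpre
  obtain ⟨s, e, piS, L, swS, ewS, cS⟩ := args
  simp only [Pre_search_chunk_py] at hpre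
  show search_chunk_py _ = search_chunk_py_alt _
  unfold search_chunk_py search_chunk_py_alt
  simp only []
  generalize piS.toList = PI at hpre ⊢
  generalize swS.toList = SW
  generalize ewS.toList = EW
  generalize cS.toList = C
  by_cases hL : L < 0
  · rw [if_pos hL]
    have hstep : ∀ (acc : List (Int × String) × PySem.Set String),
        ∀ x ∈ PySem.List.pyRange s (min e ((PI.length : Int) - L + 1)) 1,
        pvStepA PI SW EW C L acc x = acc := by
      intro acc x _
      unfold pvStepA
      rw [if_pos]
      rw [bne_iff_ne]
      intro hcontra
      omega
    rw [PySem.List.foldl_congr_mem _ _ (fun acc _ => acc) _ hstep, List.foldl_fixed]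
  · rw [if_neg hL]
    set idxs0 := PySem.List.pyRange s (min e ((PI.length : Int) - L + 1)) 1 with hidxs0
    have hsorted0 : idxs0.Pairwise (· < ·) := PySem.List.pairwise_lt_pyRange_one _ _
    -- stage 1 and stage 2 as filters
    have h1 : (if !SW.isEmpty then idxs0.filter (fun i => pvStartswithAt PI SW i (i + L)) else idxs0)
        = idxs0.filter (fun i => SW.isEmpty || pvStartswithAt PI SW i (i + L)) :=
      pvStage_if_eq idxs0 _ SW _ rfl
    rw [h1]
    have h2 : (if !EW.isEmpty then
          (idxs0.filter (fun i => SW.isEmpty || pvStartswithAt PI SW i (i + L))).filter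
            (fun i => decide (0 ≤ L - (EW.length : Int)) && pvStartswithAt PI EW (i + (L - (EW.length : Int))) (i + L))
        else idxs0.filter (fun i => SW.isEmpty || pvStartswithAt PI SW i (i + L)))
        = (idxs0.filter (fun i => SW.isEmpty || pvStartswithAt PI SW i (i + L))).filter
            (fun i => EW.isEmpty || (decide (0 ≤ L - (EW.length : Int)) && pvStartswithAt PI EW (i + (L - (EW.length : Int))) (i + L))) :=
      pvStage_if_eq _ _ EW _ rfl
    rw [h2]
    set e12 := fun i => (EW.isEmpty || (decide (0 ≤ L - (EW.length : Int)) && pvStartswithAt PI EW (i + (L - (EW.length : Int))) (i + L)))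
        && (SW.isEmpty || pvStartswithAt PI SW i (i + L)) with he12
    rw [List.filter_filter]
    -- stage 3 (the sweep) as a filter
    have hocc : ((PySem.List.pyRange 0 (PI.length : Int) 1).filter (fun p => pvStartswithAt PI C p (PI.length : Int))).Pairwise (· < ·) :=
      (PySem.List.pairwise_lt_pyRange_one _ _).filter _
    have hsorted2 : (idxs0.filter e12).Pairwise (· ≤ ·) :=
      (hsorted0.filter _).imp le_of_lt
    have h3 : (if !C.isEmpty then
          ((idxs0.filter e12).foldl
            (pvSweepStep ((PySem.List.pyRange 0 (PI.length : Int) 1).filter (fun p => pvStartswithAt PI C p (PI.length : Int)))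
              (L - (C.length : Int))) ([], 0)).1
        else idxs0.filter e12)
        = (idxs0.filter e12).filter
            (fun i => C.isEmpty || ((PySem.List.pyRange 0 (PI.length : Int) 1).filter (fun p => pvStartswithAt PI C p (PI.length : Int))).any
              (fun p => decide (i ≤ p) && decide (p ≤ i + (L - (C.length : Int))))) := by
      refine pvStage_if_eq (idxs0.filter e12)
        (fun i => ((PySem.List.pyRange 0 (PI.length : Int) 1).filter (fun p => pvStartswithAt PI C p (PI.length : Int))).any
          (fun p => decide (i ≤ p) && decide (p ≤ i + (L - (C.length : Int))))) C
        (fun x => (x.foldl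
          (pvSweepStep ((PySem.List.pyRange 0 (PI.length : Int) 1).filter (fun p => pvStartswithAt PI C p (PI.length : Int)))
            (L - (C.length : Int))) ([], 0)).1) ?_
      beta_reduce
      rw [pvSweep_eq _ _ hocc _ hsorted2 0 [] (by intro k hk; omega)]
      simp
    rw [h3, List.filter_filter]
    -- collapse the three filters into pvP
    have hP : (idxs0.filter (fun a =>
          (C.isEmpty || ((PySem.List.pyRange 0 (PI.length : Int) 1).filter (fun p => pvStartswithAt PI C p (PI.length : Int))).any
            (fun p => decide (a ≤ p) && decide (p ≤ a + (L - (C.length : Int))))) && e12 a))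
        = idxs0.filter (pvP PI SW EW C L) := by
      refine List.filter_congr ?_
      intro x _
      simp only [he12]
      unfold pvP
      generalize (SW.isEmpty || pvStartswithAt PI SW x (x + L)) = b1
      generalize (EW.isEmpty || (decide (0 ≤ L - (EW.length : Int)) && pvStartswithAt PI EW (x + (L - (EW.length : Int))) (x + L))) = b2
      generalize (C.isEmpty || ((PySem.List.pyRange 0 (PI.length : Int) 1).filter (fun p => pvStartswithAt PI C p (PI.length : Int))).any
          (fun p => decide (x ≤ p) && decide (p ≤ x + (L - (C.length : Int))))) = b3
      cases b1 <;> cases b2 <;> cases b3 <;> simp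
    rw [hP]
    -- A's loop = dedup fold over the filtered indices
    have hA : (idxs0.foldl (pvStepA PI SW EW C L) ([], PySem.Set.empty))
        = ((idxs0.filter (pvP PI SW EW C L)).foldl (pvStepDedupA PI L) ([], PySem.Set.empty)) := by
      rw [List.foldl_filter]
      refine PySem.List.foldl_congr_mem _ _ _ _ ?_
      intro acc x hx
      rw [hidxs0, PySem.List.mem_pyRange_one] at hx
      have hmin := min_le_right e ((PI.length : Int) - L + 1)
      exact pvStepA_eq_if PI SW EW C L x (by omega) (by omega) (by omega) acc
    rw [hA]
    exact pvDedup_eq PI L _ [] PySem.Set.empty PySem.Dict.empty rfl (fun _ => rfl)
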